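-- pv_equiv track=rewrite | github.com/MrBrantCode/unitest_baseline | mut_generate/mist_train_cf/cf_71325/solution.py | is_sorted_2d
-- ===== SOURCE A (Python) =====
-- def is_sorted_2d(matrix):
--     if not isinstance(matrix, list):
--         return "Error: Input should be a list"
--     if not all(isinstance(i, list) for i in matrix):
--         return "Error: All elements of the list should also be lists"
--     if not all(all(isinstance(j, int) for j in i) for i in matrix):
--         return "Error: All entries should be integers"
--
--     if len(matrix) == 0:
--         return True
--
--     row_lengths = [len(row) for row in matrix]
--     if len(set(row_lengths)) != 1:
--         return "Error: All rows should have the same length"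
--
--     for i in range(len(matrix)):
--         for j in range(len(matrix[i])-1):
--             if matrix[i][j] > matrix[i][j+1]:
--                 return False
--
--     for i in range(len(matrix[0])):
--         for j in range(len(matrix)-1):
--             if matrix[j][i] > matrix[j+1][i]:
--                 return False
--
--     return True
-- ===== SOURCE B (Python) =====
-- def is_sorted_2d(matrix):
--     if not isinstance(matrix, list):
--         return "Error: Input should be a list"
--     if not all(isinstance(i, list) for i in matrix):
--         return "Error: All elements of the list should also be lists"
--     if not all(all(isinstance(j, int) for j in i) for i in matrix):
--         return "Error: All entries should be integers"
--
--     if len(matrix) == 0: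
--         return True
--
--     if len(set(map(len, matrix))) != 1:
--         return "Error: All rows should have the same length"
--
--     # single pass over the rows keeping the previous row: each row must equal
--     # its sorted copy (row-monotone), and must dominate the previous row
--     # componentwise (column-monotone); early exit on the first violation
--     prev = None
--     for row in matrix:
--         if row != sorted(row):
--             return False
--         if prev is not None and any(p > r for p, r in zip(prev, row)):
--             return False
--         prev = row
--     return True
-- ===== Notes on version B (the rewrite author's own statement) =====
-- stated objective: alternative
-- what changed: Replaced A's two staged index-based double loops (row scan, then column scan over matrix[0]) by a single pass over the rows with a previous-row accumulator that checks each row by comparing it with its sorted copy and checks the column condition against the previous row, with early exit.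
import Mathlib
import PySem

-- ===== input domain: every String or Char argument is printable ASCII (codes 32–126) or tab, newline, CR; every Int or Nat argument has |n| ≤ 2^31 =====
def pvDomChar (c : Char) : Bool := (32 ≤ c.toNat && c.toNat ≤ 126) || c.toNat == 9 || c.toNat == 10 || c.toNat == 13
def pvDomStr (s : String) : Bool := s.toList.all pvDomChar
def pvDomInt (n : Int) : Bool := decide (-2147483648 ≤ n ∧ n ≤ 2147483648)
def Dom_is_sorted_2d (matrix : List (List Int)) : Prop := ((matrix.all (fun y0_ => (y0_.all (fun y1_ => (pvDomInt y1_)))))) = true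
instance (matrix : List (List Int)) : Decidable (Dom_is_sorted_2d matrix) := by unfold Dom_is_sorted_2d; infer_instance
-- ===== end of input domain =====

-- B replaces A's two staged index double-loops by a single pass over the rows with a
-- previous-row accumulator, checking each row against its sorted copy (alternative; same order of cost).
-- On ragged matrices both Pythons return an error STRING (not a bool): outside Pre_, ports return false there.

-- ===== PORT A =====
-- the isinstance checks are vacuous under the type List (List Int)
def is_sorted_2d (matrix : List (List Int)) : Bool :=
  if matrix.length = 0 then true
  else
    let row_lengths : List Int := matrix.map (fun row => (row.length : Int))
    if (PySem.Set.ofList row_lengths).length ≠ 1 then false  -- Python returns an error string here; excluded by Pre_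
    else if (PySem.List.pyRange 0 (matrix.length : Int) 1).any (fun i =>
        (PySem.List.pyRange 0 (((PySem.List.pyGetD matrix i []).length : Int) - 1) 1).any (fun j =>
          decide (PySem.List.pyGetD (PySem.List.pyGetD matrix i []) (j+1) 0 <
                  PySem.List.pyGetD (PySem.List.pyGetD matrix i []) j 0)))
    then false
    else if (PySem.List.pyRange 0 ((PySem.List.pyGetD matrix 0 []).length : Int) 1).any (fun i =>
        (PySem.List.pyRange 0 ((matrix.length : Int) - 1) 1).any (fun j =>
          decide (PySem.List.pyGetD (PySem.List.pyGetD matrix (j+1) []) i 0 <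
                  PySem.List.pyGetD (PySem.List.pyGetD matrix j []) i 0)))
    then false
    else true

-- ===== PORT B =====
-- the for-loop with the `prev` accumulator and its early returns, as structural recursion on the rows;
-- `sorted(row)` is PySem.List.sorted, `zip(prev, row)` is List.zip
def altGo (prev : Option (List Int)) (rows : List (List Int)) : Bool :=
  match rows with
  | [] => true
  | row :: rest =>
    if row ≠ PySem.List.sorted row (fun x => x) false then false
    else
      match prev with
      | some p =>
        if (p.zip row).any (fun q => decide (q.2 < q.1)) then false
        else altGo (some row) rest
      | none => altGo (some row) rest

def is_sorted_2d_alt (matrix : List (List Int)) : Bool :=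
  if matrix.length = 0 then true
  else if (PySem.Set.ofList (matrix.map (fun r => (r.length : Int)))).length ≠ 1 then false
    -- Python returns an error string on the ragged case; excluded by Pre_
  else altGo none matrix

-- ===== PRECONDITION & SPEC =====
-- Pre_ excludes ragged matrices (rows of unequal length), on which A returns an error STRING, not a bool.
def Pre_is_sorted_2d (matrix : List (List Int)) : Prop :=
  ∀ row ∈ matrix, row.length = (matrix.headD []).length
instance (matrix : List (List Int)) : Decidable (Pre_is_sorted_2d matrix) := by
  unfold Pre_is_sorted_2d; infer_instance
def pvWitness_is_sorted_2d : List (List Int) := [[1, 2], [2, 3]]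
def Spec_is_sorted_2d (matrix : List (List Int)) (out : Bool) : Prop := out = is_sorted_2d_alt matrix
instance (matrix : List (List Int)) (out : Bool) : Decidable (Spec_is_sorted_2d matrix out) := by unfold Spec_is_sorted_2d; infer_instance

-- ===== CLAIM (what is proved, stated in full; the proofs are below) =====
def Claim_equal_is_sorted_2d : Prop := ∀ (matrix : List (List Int)), Dom_is_sorted_2d matrix → Pre_is_sorted_2d matrix → Spec_is_sorted_2d matrix (is_sorted_2d matrix)

-- ===== LEMMAS AND PROOFS =====

def pairsOK (m : List (List Int)) : Bool :=
  (m.zip (m.drop 1)).all (fun p => (p.1.zip p.2).all (fun q => decide (q.1 ≤ q.2)))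

lemma any_gt_eq (p row : List Int) :
    (p.zip row).any (fun q => decide (q.2 < q.1)) = !((p.zip row).all (fun q => decide (q.1 ≤ q.2))) := by
  induction p.zip row with
  | nil => rfl
  | cons x xs ih =>
    simp only [List.any_cons, List.all_cons, ih, Bool.not_and]
    by_cases h : x.2 < x.1
    · simp [h, not_le.mpr h]
    · simp [h, not_lt.mp h]

def withPrev (prev : Option (List Int)) (rows : List (List Int)) : List (List Int) :=
  match prev with | some p => p :: rows | none => rows

lemma altGo_eq (rows : List (List Int)) : ∀ prev : Option (List Int),
    altGo prev rows =
      ((rows.all (fun r => decide (r = PySem.List.sorted r (fun x => x) false))) &&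
        pairsOK (withPrev prev rows)) := by
  induction rows with
  | nil =>
    intro prev
    cases prev with
    | none => rfl
    | some p => simp [altGo, pairsOK, withPrev]
  | cons row rest ih =>
    intro prev
    cases prev with
    | none =>
      simp only [altGo]
      by_cases hr : row = PySem.List.sorted row (fun x => x) false
      · rw [if_neg (not_not_intro hr), ih (some row), List.all_cons, decide_eq_true hr,
            Bool.true_and]
        rfl
      · rw [if_pos hr, List.all_cons, decide_eq_false hr, Bool.false_and, Bool.false_and]
    | some p =>
      simp only [altGo]
      by_cases hr : row = PySem.List.sorted row (fun x => x) false
      · rw [if_neg (not_not_intro hr), any_gt_eq]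
        have hps : pairsOK (withPrev (some p) (row :: rest)) =
            (((p.zip row).all (fun q => decide (q.1 ≤ q.2))) && pairsOK (row :: rest)) := by
          simp [pairsOK, withPrev]
        by_cases hv : (p.zip row).all (fun q => decide (q.1 ≤ q.2)) = true
        · rw [hv, Bool.not_true, if_neg (by simp), ih (some row), hps, hv, Bool.true_and,
              List.all_cons, decide_eq_true hr, Bool.true_and]
          rfl
        · rw [Bool.not_eq_true] at hv
          rw [hv, Bool.not_false, if_pos rfl, hps, hv]
          simp
      · rw [if_pos hr, List.all_cons, decide_eq_false hr, Bool.false_and, Bool.false_and]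

lemma rowA_iff (r : List Int) :
    ((PySem.List.pyRange 0 ((r.length : Int) - 1) 1).any
      (fun j => decide (PySem.List.pyGetD r (j+1) 0 < PySem.List.pyGetD r j 0)) = false)
    ↔ ∀ k : Nat, (h : k + 1 < r.length) → r[k] ≤ r[k+1] := by
  rw [List.any_eq_false]
  constructor
  · intro H k hk
    have h1 := H (k : Int) (by rw [PySem.List.mem_pyRange_one]; omega)
    rw [show ((k : Int) + 1) = ((k+1 : Nat) : Int) by push_cast; ring] at h1
    simp only [PySem.List.pyGetD_natCast] at h1
    rw [List.getD_eq_getElem r 0 (by omega), List.getD_eq_getElem r 0 (by omega)] at h1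
    simpa using h1
  · intro H j hj
    rw [PySem.List.mem_pyRange_one] at hj
    obtain ⟨k, rfl⟩ : ∃ k : Nat, j = (k : Int) := ⟨j.toNat, (Int.toNat_of_nonneg hj.1).symm⟩
    rw [show ((k : Int) + 1) = ((k+1 : Nat) : Int) by push_cast; ring]
    simp only [PySem.List.pyGetD_natCast]
    rw [List.getD_eq_getElem r 0 (by omega), List.getD_eq_getElem r 0 (by omega)]
    simpa using H k (by omega)

lemma rowB_iff (r : List Int) :
    ((r.zip (r.drop 1)).all (fun p => decide (p.1 ≤ p.2)) = true)
    ↔ ∀ k : Nat, (h : k + 1 < r.length) → r[k] ≤ r[k+1] := by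
  rw [List.all_eq_true]
  constructor
  · intro H k hk
    have hm : (r[k], r[k+1]) ∈ r.zip (r.drop 1) := by
      have hlen : k < (r.zip (r.drop 1)).length := by simp [List.length_zip]; omega
      have : (r.zip (r.drop 1))[k] = (r[k], r[k+1]) := by
        simp [List.getElem_zip]
      exact this ▸ List.getElem_mem hlen
    simpa using H _ hm
  · intro H p hp
    obtain ⟨k, hk, rfl⟩ := List.getElem_of_mem hp
    have hk' : k + 1 < r.length := by simp [List.length_zip] at hk; omega
    simp [List.getElem_zip]
    exact H k hk'

lemma rowOK_eq (r : List Int) :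
    (decide (r = PySem.List.sorted r (fun x => x) false))
    = (r.zip (r.drop 1)).all (fun p => decide (p.1 ≤ p.2)) := by
  have hiff : (r = PySem.List.sorted r (fun x => x) false)
      ↔ ((r.zip (r.drop 1)).all (fun p => decide (p.1 ≤ p.2)) = true) := by
    rw [rowB_iff]
    constructor
    · intro h k hk
      have hp : r.Pairwise (fun a b : Int => a ≤ b) := by
        rw [h]; simpa using PySem.List.sorted_pairwise (xs := r) (key := fun x => x)
      exact List.pairwise_iff_getElem.mp hp k (k+1) (by omega) hk (by omega)
    · intro h
      have hc : List.IsChain (fun a b : Int => a ≤ b) r := by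
        rw [List.isChain_iff_getElem]; intro i hi; exact h i hi
      have hp : r.Pairwise (fun a b : Int => a ≤ b) := List.isChain_iff_pairwise.mp hc
      exact (PySem.List.sorted_eq_self_of_pairwise r (fun x => x) (by simpa using hp)).symm
  cases hb : (r.zip (r.drop 1)).all (fun p => decide (p.1 ≤ p.2)) with
  | false => exact decide_eq_false (fun h => by rw [hiff.mp h] at hb; cases hb)
  | true => exact decide_eq_true (hiff.mpr hb)

lemma alt_body_eq (m : List (List Int)) :
    altGo none m =
      ((m.all (fun row => (row.zip (row.drop 1)).all (fun p => decide (p.1 ≤ p.2)))) &&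
        ((m.zip (m.drop 1)).all (fun p => (p.1.zip p.2).all (fun q => decide (q.1 ≤ q.2))))) := by
  rw [altGo_eq m none,
      show (fun r : List Int => decide (r = PySem.List.sorted r (fun x => x) false))
        = (fun row : List Int => (row.zip (row.drop 1)).all (fun p => decide (p.1 ≤ p.2)))
        from funext rowOK_eq]
  rfl

lemma foldl_add_const {α : Type} [BEq α] [LawfulBEq α] (c : α) (l : List α)
    (h : ∀ x ∈ l, x = c) : List.foldl PySem.Set.add [c] l = [c] := by
  induction l with
  | nil => rfl
  | cons x xs ih =>
    have hx : x = c := h x (by simp)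
    subst hx
    have : PySem.Set.add [x] x = [x] := by simp [PySem.Set.add, PySem.Set.contains]
    rw [List.foldl_cons, this]
    exact ih (fun y hy => h y (by simp [hy]))

lemma set_const_len {α : Type} [BEq α] [LawfulBEq α] (l : List α) (c : α)
    (h : ∀ x ∈ l, x = c) (hne : l ≠ []) : (PySem.Set.ofList l).length = 1 := by
  obtain ⟨x, xs, rfl⟩ := List.exists_cons_of_ne_nil hne
  have hx : x = c := h x (by simp)
  subst hx
  rw [PySem.Set.ofList_eq_foldl, List.foldl_cons]
  have : PySem.Set.add ([] : List α) x = [x] := by simp [PySem.Set.add, PySem.Set.contains]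
  rw [this, foldl_add_const x xs (fun y hy => h y (by simp [hy]))]
  rfl

lemma vertA_iff (m : List (List Int)) (w : Nat)
    (hw : ∀ row ∈ m, row.length = w) (hne : m ≠ []) :
    (((PySem.List.pyRange 0 (((PySem.List.pyGetD m 0 []).length : Int)) 1).any (fun i =>
      (PySem.List.pyRange 0 ((m.length : Int) - 1) 1).any (fun j =>
        decide (PySem.List.pyGetD (PySem.List.pyGetD m (j+1) []) i 0 <
                PySem.List.pyGetD (PySem.List.pyGetD m j []) i 0)))) = false)
    ↔ ∀ j i : Nat, j + 1 < m.length → i < w →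
        (m.getD j []).getD i 0 ≤ (m.getD (j+1) []).getD i 0 := by
  have h0 : (PySem.List.pyGetD m 0 []).length = w := by
    rw [PySem.List.pyGetD_zero]
    obtain ⟨x, xs, rfl⟩ := List.exists_cons_of_ne_nil hne
    exact hw x (by simp)
  rw [h0, List.any_eq_false]
  constructor
  · intro H j i hj hi
    have h1 := H (i : Int) (by rw [PySem.List.mem_pyRange_one]; omega)
    rw [Bool.not_eq_true, List.any_eq_false] at h1
    have h2 := h1 (j : Int) (by rw [PySem.List.mem_pyRange_one]; omega)
    rw [show ((j : Int) + 1) = ((j+1 : Nat) : Int) by push_cast; ring] at h2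
    simp only [PySem.List.pyGetD_natCast] at h2
    rw [List.getD_eq_getElem m [] (by omega), List.getD_eq_getElem m [] (by omega)] at h2
    simp only [decide_eq_true_eq, not_lt] at h2
    rw [List.getD_eq_getElem m [] (show j < m.length by omega),
        List.getD_eq_getElem m [] hj]
    exact h2
  · intro H i hi
    rw [PySem.List.mem_pyRange_one] at hi
    rw [Bool.not_eq_true, List.any_eq_false]
    intro j hj
    rw [PySem.List.mem_pyRange_one] at hj
    obtain ⟨jn, rfl⟩ : ∃ k : Nat, j = (k : Int) := ⟨j.toNat, (Int.toNat_of_nonneg hj.1).symm⟩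
    obtain ⟨inn, rfl⟩ : ∃ k : Nat, i = (k : Int) := ⟨i.toNat, (Int.toNat_of_nonneg hi.1).symm⟩
    rw [show ((jn : Int) + 1) = ((jn+1 : Nat) : Int) by push_cast; ring]
    simp only [PySem.List.pyGetD_natCast]
    rw [List.getD_eq_getElem m [] (by omega), List.getD_eq_getElem m [] (by omega)]
    have h3 := H jn inn (by omega) (by omega)
    rw [List.getD_eq_getElem m [] (show jn < m.length by omega),
        List.getD_eq_getElem m [] (show jn + 1 < m.length by omega)] at h3
    simp only [decide_eq_true_eq, not_lt]
    exact h3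

lemma vertB_iff (m : List (List Int)) (w : Nat)
    (hw : ∀ row ∈ m, row.length = w) :
    (((m.zip (m.drop 1)).all (fun p => (p.1.zip p.2).all (fun q => decide (q.1 ≤ q.2)))) = true)
    ↔ ∀ j i : Nat, j + 1 < m.length → i < w →
        (m.getD j []).getD i 0 ≤ (m.getD (j+1) []).getD i 0 := by
  rw [List.all_eq_true]
  constructor
  · intro H j i hj hi
    have hm : (m[j]'(by omega), m[j+1]'hj) ∈ m.zip (m.drop 1) := by
      have hlen : j < (m.zip (m.drop 1)).length := by simp [List.length_zip]; omega
      have : (m.zip (m.drop 1))[j] = (m[j]'(by omega), m[j+1]'hj) := by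
        simp [List.getElem_zip]
      exact this ▸ List.getElem_mem hlen
    have h1 := H _ hm
    rw [List.all_eq_true] at h1
    have hmem : ((m[j]'(by omega))[i]'(by rw [hw _ (List.getElem_mem _)]; omega),
                 (m[j+1]'hj)[i]'(by rw [hw _ (List.getElem_mem _)]; omega))
        ∈ (m[j]'(by omega)).zip (m[j+1]'hj) := by
      have hlen : i < ((m[j]'(by omega)).zip (m[j+1]'hj)).length := by
        rw [List.length_zip, hw _ (List.getElem_mem _), hw _ (List.getElem_mem _)]; omega
      have : ((m[j]'(by omega)).zip (m[j+1]'hj))[i] =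
          ((m[j]'(by omega))[i]'(by rw [hw _ (List.getElem_mem _)]; omega),
           (m[j+1]'hj)[i]'(by rw [hw _ (List.getElem_mem _)]; omega)) := by
        simp [List.getElem_zip]
      exact this ▸ List.getElem_mem hlen
    have h2 := h1 _ hmem
    simp only [decide_eq_true_eq] at h2
    rw [List.getD_eq_getElem m [] (show j < m.length by omega), List.getD_eq_getElem m [] hj,
        List.getD_eq_getElem _ _ (by rw [hw _ (List.getElem_mem _)]; omega),
        List.getD_eq_getElem _ _ (by rw [hw _ (List.getElem_mem _)]; omega)]
    exact h2
  · intro H p hp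
    obtain ⟨j, hj, rfl⟩ := List.getElem_of_mem hp
    have hj' : j + 1 < m.length := by simp [List.length_zip] at hj; omega
    rw [List.all_eq_true]
    intro q hq
    obtain ⟨i, hi, rfl⟩ := List.getElem_of_mem hq
    simp only [List.getElem_zip, decide_eq_true_eq]
    have hi' : i < w := by
      simp only [List.getElem_zip, List.length_zip] at hi
      rw [hw _ (List.getElem_mem _)] at hi
      omega
    have h3 := H j i hj' hi'
    rw [List.getD_eq_getElem m [] (show j < m.length by omega), List.getD_eq_getElem m [] hj',
        List.getD_eq_getElem _ _ (by rw [hw _ (List.getElem_mem _)]; omega),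
        List.getD_eq_getElem _ _ (by rw [hw _ (List.getElem_mem _)]; omega)] at h3
    simp only [List.getElem_zip, List.getElem_drop] at *
    convert h3 using 2
    congr 1
    omega

lemma horizA_iff (m : List (List Int)) :
    (((PySem.List.pyRange 0 ((m.length : Int)) 1).any (fun i =>
      (PySem.List.pyRange 0 (((PySem.List.pyGetD m i []).length : Int) - 1) 1).any (fun j =>
        decide (PySem.List.pyGetD (PySem.List.pyGetD m i []) (j+1) 0 <
                PySem.List.pyGetD (PySem.List.pyGetD m i []) j 0)))) = false)
    ↔ ((m.all (fun row => (row.zip (row.drop 1)).all (fun p => decide (p.1 ≤ p.2)))) = true) := by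
  have hmap : (PySem.List.pyRange 0 ((m.length : Int)) 1).map (fun i => PySem.List.pyGetD m i []) = m :=
    PySem.List.map_pyGetD_pyRange_zero' ..
  have hstep : ((PySem.List.pyRange 0 ((m.length : Int)) 1).any (fun i =>
      (PySem.List.pyRange 0 (((PySem.List.pyGetD m i []).length : Int) - 1) 1).any (fun j =>
        decide (PySem.List.pyGetD (PySem.List.pyGetD m i []) (j+1) 0 <
                PySem.List.pyGetD (PySem.List.pyGetD m i []) j 0))))
      = m.any (fun r => (PySem.List.pyRange 0 (((r.length : Int)) - 1) 1).any (fun j =>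
        decide (PySem.List.pyGetD r (j+1) 0 < PySem.List.pyGetD r j 0))) := by
    conv_rhs => rw [← hmap, List.any_map]
    rfl
  rw [hstep, List.any_eq_false, List.all_eq_true]
  constructor
  · intro H row hrow
    rw [rowB_iff, ← rowA_iff]
    have := H row hrow
    rwa [Bool.not_eq_true] at this
  · intro H row hrow
    rw [Bool.not_eq_true, rowA_iff, ← rowB_iff]
    exact H row hrow

theorem ports_agree : ∀ (m : List (List Int)), Pre_is_sorted_2d m → is_sorted_2d m = is_sorted_2d_alt m := by
  intro m hpre
  unfold is_sorted_2d is_sorted_2d_alt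
  by_cases hm : m.length = 0
  · simp [hm]
  · have hne : m ≠ [] := fun h => hm (by simp [h])
    have hw : ∀ row ∈ m, row.length = (m.headD []).length := hpre
    have hset : (PySem.Set.ofList (m.map (fun row => ((row.length : Int))))).length = 1 := by
      apply set_const_len _ (((m.headD []).length : Int))
      · intro x hx
        simp only [List.mem_map] at hx
        obtain ⟨row, hrow, rfl⟩ := hx
        exact congrArg (fun n : Nat => (n : Int)) (hw row hrow)
      · simp [hne]
    simp only [if_neg hm]
    rw [if_neg (not_not_intro hset), if_neg (not_not_intro hset), alt_body_eq]
    by_cases hH : (m.all (fun row => (row.zip (row.drop 1)).all (fun p => decide (p.1 ≤ p.2)))) = true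
    · rw [if_neg (by simp [(horizA_iff m).2 hH])]
      by_cases hV : ((m.zip (m.drop 1)).all (fun p => (p.1.zip p.2).all (fun q => decide (q.1 ≤ q.2)))) = true
      · rw [if_neg (by simp [(vertA_iff m _ hw hne).2 ((vertB_iff m _ hw).1 hV)])]
        rw [hH, hV]; rfl
      · have hva : ((PySem.List.pyRange 0 (((PySem.List.pyGetD m 0 []).length : Int)) 1).any (fun i =>
            (PySem.List.pyRange 0 ((m.length : Int) - 1) 1).any (fun j =>
              decide (PySem.List.pyGetD (PySem.List.pyGetD m (j+1) []) i 0 <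
                      PySem.List.pyGetD (PySem.List.pyGetD m j []) i 0)))) = true := by
          cases hvb : ((PySem.List.pyRange 0 (((PySem.List.pyGetD m 0 []).length : Int)) 1).any (fun i =>
            (PySem.List.pyRange 0 ((m.length : Int) - 1) 1).any (fun j =>
              decide (PySem.List.pyGetD (PySem.List.pyGetD m (j+1) []) i 0 <
                      PySem.List.pyGetD (PySem.List.pyGetD m j []) i 0)))) with
          | false => exact absurd ((vertB_iff m _ hw).2 ((vertA_iff m _ hw hne).1 hvb)) hV
          | true => rfl
        rw [if_pos hva]
        rw [Bool.not_eq_true] at hV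
        rw [hV, Bool.and_false]
    · have hha : ((PySem.List.pyRange 0 ((m.length : Int)) 1).any (fun i =>
          (PySem.List.pyRange 0 (((PySem.List.pyGetD m i []).length : Int) - 1) 1).any (fun j =>
            decide (PySem.List.pyGetD (PySem.List.pyGetD m i []) (j+1) 0 <
                    PySem.List.pyGetD (PySem.List.pyGetD m i []) j 0)))) = true := by
        cases hhb : ((PySem.List.pyRange 0 ((m.length : Int)) 1).any (fun i =>
          (PySem.List.pyRange 0 (((PySem.List.pyGetD m i []).length : Int) - 1) 1).any (fun j =>
            decide (PySem.List.pyGetD (PySem.List.pyGetD m i []) (j+1) 0 <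
                    PySem.List.pyGetD (PySem.List.pyGetD m i []) j 0)))) with
        | false => exact absurd ((horizA_iff m).1 hhb) hH
        | true => rfl
      rw [if_pos hha]
      rw [Bool.not_eq_true] at hH
      rw [hH, Bool.false_and]

-- ===== VERDICT (by name: the statement is the Claim_ definition above) =====
theorem is_sorted_2d_spec : Claim_equal_is_sorted_2d := by
  intro m _ hpre
  exact ports_agree m hpre
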